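-- pv_equiv track=rewrite | github.com/ADVAGA1/LP-Practica | funx.py | depurar
-- ===== SOURCE A (Python) =====
-- def depurar(ins: str) -> str:
--
--     def extender(var):
--         p = ""
--         for s in var:
--             p += s
--             p += " "
--         return p
--
--     if ins[0] == "#":
--         lineas = ins.splitlines()
--         lineas.pop(0)
--         nins = extender(lineas)
--         return depurar(nins)
--     return ins
-- ===== SOURCE B (Python) =====
-- def depurar(ins: str) -> str:
--     while ins[0] == "#":
--         lineas = ins.splitlines()
--         lineas.pop(0)
--         ins = "".join(s + " " for s in lineas)
--     return ins
-- ===== Notes on version B (the rewrite author's own statement) =====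
-- stated objective: simpler
-- what changed: Replaced the tail recursion plus a manual string-accumulator helper by a plain while loop whose body rebuilds the string with a single join of a generator expression.
import Mathlib
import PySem

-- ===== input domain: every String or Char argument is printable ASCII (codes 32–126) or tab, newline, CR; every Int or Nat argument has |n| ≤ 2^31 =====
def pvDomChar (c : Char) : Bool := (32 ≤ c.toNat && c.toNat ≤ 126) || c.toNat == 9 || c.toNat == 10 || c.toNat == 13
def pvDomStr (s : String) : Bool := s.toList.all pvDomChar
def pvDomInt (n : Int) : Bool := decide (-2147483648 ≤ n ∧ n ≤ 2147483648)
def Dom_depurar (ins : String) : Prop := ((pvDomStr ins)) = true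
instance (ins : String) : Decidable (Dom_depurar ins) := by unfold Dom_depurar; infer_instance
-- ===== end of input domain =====

-- B replaces A's tail recursion + manual accumulator helper by a while loop whose body
-- joins the remaining lines in one expression (objective: simpler; same cost).

-- ===== PORT A =====
-- helper 'extender': p = ""; for s in var: p += s; p += " "
def pvExtender (var : List (List Char)) : List Char :=
  var.foldl (fun p s => p ++ s ++ [' ']) []

-- A's tail recursion, with fuel as a totality guard only (on inputs in Pre_ at most
-- two iterations happen, so the fuel is never exhausted there).
-- 'lineas.pop(0)' is '.tail' (when the branch is taken, cs ≠ [] so splitlines cs ≠ []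
-- and pop(0) cannot raise); 'ins[0] == "#"' on an empty string raises in Python —
-- that input is outside Pre_ (pyGetD's default branch is never reached under Pre_).
def depurarGo : Nat → List Char → List Char
  | 0, cs => cs
  | n + 1, cs =>
    if PySem.List.pyGetD cs 0 ' ' = '#' then
      depurarGo n (pvExtender (PySem.Chars.splitlines cs).tail)
    else cs

def depurar (ins : String) : String :=
  String.ofList (depurarGo (ins.toList.length + 1) ins.toList)

-- ===== PORT B =====
-- B's while loop, same fuel guard; the body is one join over the mapped tail of the lines.
def depurarLoop : Nat → List Char → List Char
  | 0, cs => cs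
  | n + 1, cs =>
    if PySem.List.pyGet? cs 0 = some '#' then
      depurarLoop n
        (PySem.Chars.join [] ((PySem.Chars.splitlines cs).tail.map (fun s => s ++ [' '])))
    else cs

def depurar_alt (ins : String) : String :=
  String.ofList (depurarLoop (ins.toList.length + 1) ins.toList)

-- ===== PRECONDITION & SPEC =====
-- A (and B alike) raise IndexError exactly when: ins is empty; or ins starts with '#'
-- and has fewer than two lines (the joined remainder is empty); or ins starts with '#'
-- and the remainder after dropping the first line starts with '#' (the next round
-- empties the string). Pre_ excludes exactly those raising inputs and nothing else.
def Pre_depurar (ins : String) : Prop :=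
  ins.toList ≠ [] ∧
  (ins.toList.head? = some '#' →
    2 ≤ (PySem.Chars.splitlines ins.toList).length ∧
    ((PySem.Chars.splitlines ins.toList).getD 1 []).headD ' ' ≠ '#')
instance (ins : String) : Decidable (Pre_depurar ins) := by unfold Pre_depurar; infer_instance

def pvWitness_depurar : String := "#cab\nx y\nz"

def Spec_depurar (ins : String) (out : String) : Prop := out = depurar_alt ins
instance (ins : String) (out : String) : Decidable (Spec_depurar ins out) := by unfold Spec_depurar; infer_instance

-- ===== CLAIM (what is proved, stated in full; the proofs are below) =====
def Claim_equal_depurar : Prop := ∀ (ins : String), Dom_depurar ins → Pre_depurar ins → Spec_depurar ins (depurar ins)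

-- ===== LEMMAS AND PROOFS =====

theorem pv_flatten_intersperse_nil (l : List (List Char)) :
    (List.intersperse [] l).flatten = l.flatten := by
  induction l with
  | nil => simp
  | cons a t ih => cases t <;> simp_all [List.intersperse]

theorem pv_join_nil_eq_flatten (l : List (List Char)) :
    PySem.Chars.join [] l = l.flatten := by
  simp [PySem.Chars.join, List.intercalate, pv_flatten_intersperse_nil]

-- A's accumulator helper computes the same string as B's join of the mapped lines.
theorem pv_extender_eq (var : List (List Char)) :
    pvExtender var = PySem.Chars.join [] (var.map (fun s => s ++ [' '])) := by
  rw [pv_join_nil_eq_flatten]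
  unfold pvExtender
  suffices h : ∀ acc : List Char,
      var.foldl (fun p s => p ++ s ++ [' ']) acc = acc ++ (var.map (fun s => s ++ [' '])).flatten by
    exact (h []).trans (List.nil_append _)
  induction var with
  | nil => simp
  | cons a t ih => intro acc; simp [List.append_assoc]

-- Both loops stop immediately on a string not starting with '#'.
theorem pv_go_stop (n : Nat) (cs : List Char) (h : cs.head? ≠ some '#') :
    depurarGo (n + 1) cs = cs := by
  cases cs with
  | nil => simp [depurarGo, PySem.List.pyGetD, PySem.List.pyGet?]
  | cons c t => simp_all [depurarGo, PySem.List.pyGetD_zero_cons]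

theorem pv_loop_stop (n : Nat) (cs : List Char) (h : cs.head? ≠ some '#') :
    depurarLoop (n + 1) cs = cs := by
  cases cs with
  | nil => simp [depurarLoop, PySem.List.pyGet?]
  | cons c t => simp_all [depurarLoop]

-- the remainder built from lines l1 :: t starts with l1's first char (or ' ' if l1 = []).
theorem pv_head_flatten (l1 : List Char) (t : List (List Char)) :
    (((l1 :: t).map (fun s => s ++ [' '])).flatten).head? = some (l1.headD ' ') := by
  cases l1 <;> simp

-- ===== VERDICT (by name: the statement is the Claim_ definition above) =====
theorem depurar_spec : Claim_equal_depurar := by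
  intro ins _ hpre
  obtain ⟨hne, hsec⟩ := hpre
  unfold Spec_depurar depurar depurar_alt
  by_cases hh : ins.toList.head? = some '#'
  · obtain ⟨hlen, hch⟩ := hsec hh
    obtain ⟨c, t, hcs⟩ := List.exists_cons_of_ne_nil hne
    rw [hcs] at hh hlen hch ⊢
    -- first iteration of both programs
    have hc : c = '#' := by simpa using hh
    subst hc
    rw [show ('#' :: t : List Char).length + 1 = t.length + 1 + 1 from by simp]
    rw [show depurarGo (t.length + 1 + 1) ('#' :: t) =
          depurarGo (t.length + 1) (pvExtender (PySem.Chars.splitlines ('#' :: t)).tail) from by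
        simp [depurarGo, PySem.List.pyGetD_zero_cons]]
    rw [show depurarLoop (t.length + 1 + 1) ('#' :: t) =
          depurarLoop (t.length + 1)
            (PySem.Chars.join [] ((PySem.Chars.splitlines ('#' :: t)).tail.map (fun s => s ++ [' ']))) from by
        simp [depurarLoop]]
    rw [pv_extender_eq]
    -- the new string does not start with '#', so both stop
    obtain ⟨l0, ls, hls⟩ := List.exists_cons_of_ne_nil
      (show PySem.Chars.splitlines ('#' :: t) ≠ [] from by intro h; rw [h] at hlen; simp at hlen)
    obtain ⟨l1, ls', hls'⟩ := List.exists_cons_of_ne_nil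
      (show ls ≠ [] from by intro h; rw [h] at hls; rw [hls] at hlen; simp at hlen)
    rw [hls, hls']
    rw [hls, hls'] at hch
    have hhd : (PySem.Chars.join [] ((l1 :: ls').map (fun s => s ++ [' ']))).head? ≠ some '#' := by
      rw [pv_join_nil_eq_flatten, pv_head_flatten]
      simpa using hch
    simp only [List.tail_cons]
    rw [pv_go_stop _ _ hhd, pv_loop_stop _ _ hhd]
  · rw [show ins.toList.length + 1 = ins.toList.length + 1 from rfl]
    rw [pv_go_stop _ _ hh, pv_loop_stop _ _ hh]
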